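-- pv_equiv track=rewrite | github.com/plasma-umass/coverup | src/coverup/utils.py | lines_branches_do
-- ===== SOURCE A (Python) =====
-- import typing as T
--
-- def format_ranges(lines: T.Set[int], negative: T.Set[int]) -> str:
--     """Formats sets of line numbers as comma-separated lists, collapsing neighboring lines into ranges
--        for brevity."""
--
--     def get_range(lines):
--         it = iter(sorted(lines))
--
--         a = next(it, None)
--         while a is not None:
--             b = a
--             while (n := next(it, None)) is not None and not (set(range(b+1,n+1)) & negative):
--                 b = n
--
--             if a == b:
--                 yield str(a)
--             else:
--                 yield f"{a}-{b}"
--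
--             a = n
--
--     return ", ".join(get_range(lines))
--
-- def format_branches(branches):
--     for br in sorted(branches):
--         yield f"{br[0]}->exit" if br[1] == 0 else f"{br[0]}->{br[1]}"
--
-- def lines_branches_do(lines: T.Set[int], neg_lines: T.Set[int], branches: T.Set[T.Tuple[int, int]]) -> str:
--     relevant_branches = {b for b in branches if b[0] not in lines and b[1] not in lines} if branches else set()
--
--     s = ''
--     if lines:
--         s += f"line{'s' if len(lines)>1 else ''} {format_ranges(lines, neg_lines)}"
--
--         if relevant_branches:
--             s += " and "
--
--     if relevant_branches:
--         s += f"branch{'es' if len(relevant_branches)>1 else ''} "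
--         s += ", ".join(format_branches(relevant_branches))
--
--     s += " does" if len(lines)+len(relevant_branches) == 1 else " do"
--     return s
-- ===== SOURCE B (Python) =====
-- import typing as T
--
-- def lines_branches_do(lines: T.Set[int], neg_lines: T.Set[int], branches: T.Set[T.Tuple[int, int]]) -> str:
--     relevant = sorted({b for b in branches if b[0] not in lines and b[1] not in lines})
--
--     parts = []
--     if lines:
--         neg = sorted(neg_lines)
--         m = len(neg)
--         srt = sorted(lines)
--         out = []
--         j = 0
--         a = b = srt[0]
--         for n in srt[1:]:
--             while j < m and neg[j] <= b:   # b only grows, so j never moves back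
--                 j += 1
--             if j < m and neg[j] <= n:      # a negative line lies in (b, n]: close the range
--                 out.append(str(a) if a == b else f"{a}-{b}")
--                 a = n
--             b = n
--         out.append(str(a) if a == b else f"{a}-{b}")
--         parts.append(f"line{'s' if len(lines) > 1 else ''} {', '.join(out)}")
--
--     if relevant:
--         body = ", ".join(f"{x}->{'exit' if y == 0 else y}" for x, y in relevant)
--         parts.append(f"branch{'es' if len(relevant) > 1 else ''} {body}")
--
--     return " and ".join(parts) + (" does" if len(lines) + len(relevant) == 1 else " do")
-- ===== Notes on version B (the rewrite author's own statement) =====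
-- stated objective: faster
-- what changed: B tests whether a gap between consecutive sorted lines contains a negative line with a single forward-moving merge-scan pointer into the sorted negative list, instead of A's materialising set(range(b+1,n+1)) and intersecting it with the negative set for every gap; the sentence is assembled by joining collected parts instead of flag-guarded concatenation.
import Mathlib
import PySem

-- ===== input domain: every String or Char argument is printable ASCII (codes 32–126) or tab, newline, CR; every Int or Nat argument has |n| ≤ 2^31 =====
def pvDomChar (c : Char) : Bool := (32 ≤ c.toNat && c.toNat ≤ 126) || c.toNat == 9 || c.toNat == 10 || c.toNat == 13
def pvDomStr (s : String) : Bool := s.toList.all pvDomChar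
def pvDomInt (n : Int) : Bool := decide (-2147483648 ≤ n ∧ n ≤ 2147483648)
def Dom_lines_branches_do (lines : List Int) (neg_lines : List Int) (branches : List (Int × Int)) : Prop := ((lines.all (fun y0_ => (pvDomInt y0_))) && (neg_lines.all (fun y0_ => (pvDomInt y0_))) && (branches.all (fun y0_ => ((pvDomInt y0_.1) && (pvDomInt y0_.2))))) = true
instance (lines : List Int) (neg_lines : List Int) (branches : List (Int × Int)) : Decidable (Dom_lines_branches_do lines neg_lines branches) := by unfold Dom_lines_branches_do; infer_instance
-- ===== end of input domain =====

-- B replaces A's per-gap 'set(range(b+1,n+1)) & negative' test by a single merge-scan pointer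
-- into the sorted negative lines (one pass over both sorted lists), and assembles the sentence
-- by joining parts instead of flag-guarded concatenation.
-- The set-typed parameters are modelled as lists of the sets' elements; both ports read them identically.

-- ===== PORT A =====

-- truthiness of `set(range(b+1, n+1)) & negative`: only non-emptiness of the intersection is
-- consumed, so it is ported as 'some element of the range lies in the negative set' — exact,
-- since the intersection is non-empty iff some range element is a member of the set
def pvA_gap (negative : List Int) (b n : Int) : Bool :=
  let negSet := PySem.Set.ofList negative
  (PySem.List.pyRange (b + 1) (n + 1) 1).any (fun x => PySem.Set.contains negSet x)

-- the inner `while (n := next(it, None)) is not None and not (… & negative): b = n` loop: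
-- returns the final b and the rest of the iterator (headed by the n that stopped the loop, if any)
def pvMerge (t : Int → Int → Bool) : Int → List Int → Int × List Int
  | b, [] => (b, [])
  | b, n :: rest => if t b n then (b, n :: rest) else pvMerge t n rest

theorem pvMerge_len (t : Int → Int → Bool) (b : Int) (l : List Int) :
    (pvMerge t b l).2.length ≤ l.length := by
  induction l generalizing b with
  | nil => simp [pvMerge]
  | cons n rest ih =>
    simp only [pvMerge]
    split
    · simp
    · exact le_trans (ih n) (Nat.le_succ _)

-- the generator `get_range`, one yielded string per outer-loop iteration
def pvGroups (t : Int → Int → Bool) : List Int → List String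
  | [] => []
  | a :: rest =>
    let p := pvMerge t a rest
    (if a == p.1 then PySem.Int.toStr a
     else PySem.Int.toStr a ++ "-" ++ PySem.Int.toStr p.1) :: pvGroups t p.2
termination_by l => l.length
decreasing_by exact Nat.lt_succ_of_le (pvMerge_len t a rest)

def pvA_format_ranges (lines : List Int) (negative : List Int) : String :=
  PySem.Str.join ", " (pvGroups (pvA_gap negative) (PySem.List.sorted lines (fun x => x)))

def pvA_fmtBranch (br : Int × Int) : String :=
  if br.2 == 0 then PySem.Int.toStr br.1 ++ "->exit"
  else PySem.Int.toStr br.1 ++ "->" ++ PySem.Int.toStr br.2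

def lines_branches_do (lines : List Int) (neg_lines : List Int) (branches : List (Int × Int)) : String :=
  let relevant_branches : List (Int × Int) :=
    if !branches.isEmpty then
      PySem.Set.ofList (branches.filter (fun b => !(lines.contains b.1) && !(lines.contains b.2)))
    else []
  let s := ""
  let s := if !lines.isEmpty then
      s ++ "line" ++ (if lines.length > 1 then "s" else "") ++ " " ++ pvA_format_ranges lines neg_lines
        ++ (if !relevant_branches.isEmpty then " and " else "")
    else s
  let s := if !relevant_branches.isEmpty then
      s ++ "branch" ++ (if relevant_branches.length > 1 then "es" else "") ++ " "
        ++ PySem.Str.join ", "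
            ((PySem.List.sorted2 relevant_branches (fun p => p.1) (fun p => p.2)).map pvA_fmtBranch)
    else s
  s ++ (if lines.length + relevant_branches.length == 1 then " does" else " do")

-- ===== PORT B =====

-- `while j < m and neg[j] <= b: j += 1`
def pvB_adv (neg : List Int) (b : Int) (j : Nat) : Nat :=
  match h : neg[j]? with
  | some x => if x ≤ b then pvB_adv neg b (j + 1) else j
  | none => j
termination_by neg.length - j
decreasing_by
  have : j < neg.length := List.getElem?_eq_some_iff.mp h |>.1
  omega

def pvB_fmtRange (p : Int × Int) : String :=
  if p.1 == p.2 then PySem.Int.toStr p.1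
  else PySem.Int.toStr p.1 ++ "-" ++ PySem.Int.toStr p.2

def pvB_fmtBranch (br : Int × Int) : String :=
  PySem.Int.toStr br.1 ++ "->" ++ (if br.2 == 0 then "exit" else PySem.Int.toStr br.2)

-- one iteration of B's grouping loop; state = (a, b, j, collected range strings)
def pvB_step (neg : List Int) (st : Int × Int × Nat × List String) (n : Int) :
    Int × Int × Nat × List String :=
  let j := pvB_adv neg st.2.1 st.2.2.1
  if (match neg[j]? with | some x => decide (x ≤ n) | none => false) then
    (n, n, j, st.2.2.2 ++ [pvB_fmtRange (st.1, st.2.1)])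
  else (st.1, n, j, st.2.2.2)

def lines_branches_do_alt (lines : List Int) (neg_lines : List Int) (branches : List (Int × Int)) : String :=
  let relevant :=
    PySem.List.sorted2
      (PySem.Set.ofList (branches.filter (fun b => !(lines.contains b.1) && !(lines.contains b.2))))
      (fun p => p.1) (fun p => p.2)
  let lineParts : List String :=
    match PySem.List.sorted lines (fun x => x) with
    | [] => []
    | a0 :: rest =>
      let neg := PySem.List.sorted neg_lines (fun x => x)
      let st := rest.foldl (pvB_step neg) (a0, a0, 0, [])
      let out := st.2.2.2 ++ [pvB_fmtRange (st.1, st.2.1)]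
      ["line" ++ (if lines.length > 1 then "s" else "") ++ " " ++ PySem.Str.join ", " out]
  let parts := lineParts ++
    (if !relevant.isEmpty then
      ["branch" ++ (if relevant.length > 1 then "es" else "") ++ " "
        ++ PySem.Str.join ", " (relevant.map pvB_fmtBranch)]
     else [])
  PySem.Str.join " and " parts ++ (if lines.length + relevant.length == 1 then " does" else " do")

-- ===== PRECONDITION & SPEC =====
def Spec_lines_branches_do (lines : List Int) (neg_lines : List Int) (branches : List (Int × Int)) (out : String) : Prop := out = lines_branches_do_alt lines neg_lines branches
instance (lines : List Int) (neg_lines : List Int) (branches : List (Int × Int)) (out : String) : Decidable (Spec_lines_branches_do lines neg_lines branches out) := by unfold Spec_lines_branches_do; infer_instance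

-- ===== CLAIM (what is proved, stated in full; the proofs are below) =====
def Claim_equal_lines_branches_do : Prop := ∀ (lines : List Int) (neg_lines : List Int) (branches : List (Int × Int)), Dom_lines_branches_do lines neg_lines branches → Spec_lines_branches_do lines neg_lines branches (lines_branches_do lines neg_lines branches)

-- ===== LEMMAS AND PROOFS =====

theorem pv_fmtBranch_eq : pvA_fmtBranch = pvB_fmtBranch := by
  funext br
  unfold pvA_fmtBranch pvB_fmtBranch
  by_cases h : br.2 == 0
  · simp only [h, if_true]
    rw [String.append_assoc]
    congr 1
  · simp only [Bool.not_eq_true] at h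
    simp [h]

theorem pv_strJoin_nil (s : String) : PySem.Str.join s [] = "" := by
  apply String.toList_inj.mp
  rw [PySem.Str.toList_join]
  simp [PySem.Chars.join_nil]

theorem pv_strJoin_singleton (s x : String) : PySem.Str.join s [x] = x := by
  apply String.toList_inj.mp
  rw [PySem.Str.toList_join]
  simp [PySem.Chars.join_singleton]

theorem pv_strJoin_pair (s x y : String) : PySem.Str.join s [x, y] = x ++ s ++ y := by
  apply String.toList_inj.mp
  rw [PySem.Str.toList_join]
  simp [PySem.Chars.join_cons_cons, PySem.Chars.join_singleton, String.toList_append]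

theorem pv_adv_spec (neg : List Int) (b : Int) (j : Nat)
    (hbef : ∀ k (hk : k < neg.length), k < j → neg[k] ≤ b) :
    (∀ k (hk : k < neg.length), k < pvB_adv neg b j → neg[k] ≤ b) ∧
      (∀ h : pvB_adv neg b j < neg.length, b < neg[pvB_adv neg b j]) := by
  fun_induction pvB_adv neg b j with
  | case1 j x h hle ih =>
    apply ih
    intro k hk hkj
    have hj : j < neg.length := (List.getElem?_eq_some_iff.mp h).1
    rcases Nat.lt_or_ge k j with hc | hc
    · exact hbef k hk hc
    · have : k = j := by omega
      subst this
      have : neg[k] = x := by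
        have := (List.getElem?_eq_some_iff.mp h).2
        simpa using this
      omega
  | case2 j x h hgt =>
    refine ⟨hbef, fun hl => ?_⟩
    have : neg[j] = x := by
      have := (List.getElem?_eq_some_iff.mp h).2
      simpa using this
    omega
  | case3 j h =>
    refine ⟨hbef, fun hl => ?_⟩
    have := List.getElem?_eq_none_iff.mp h
    omega

-- A's gap test, evaluated against a probe index i into the sorted negative list that
-- separates the elements ≤ b from those > b
theorem pv_probe_eq (negative : List Int) (b n : Int) (i : Nat)
    (hbef : ∀ k (hk : k < (PySem.List.sorted negative (fun x => x)).length), k < i →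
      (PySem.List.sorted negative (fun x => x))[k] ≤ b)
    (haft : ∀ h : i < (PySem.List.sorted negative (fun x => x)).length,
      b < (PySem.List.sorted negative (fun x => x))[i]) :
    pvA_gap negative b n
      = (match (PySem.List.sorted negative (fun x => x))[i]? with
          | some x => decide (x ≤ n) | none => false) := by
  have hpair : (PySem.List.sorted negative (fun x => x)).Pairwise (fun a b => a ≤ b) :=
    PySem.List.sorted_pairwise negative (fun x => x)
  have hmem : ∀ x : Int, x ∈ PySem.List.sorted negative (fun x => x) ↔ x ∈ negative :=
    fun x => (PySem.List.sorted_perm negative (fun x => x) false).mem_iff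
  set neg := PySem.List.sorted negative (fun x => x) with hneg
  have hL : pvA_gap negative b n = true ↔ ∃ x ∈ negative, b < x ∧ x ≤ n := by
    simp only [pvA_gap, List.any_eq_true, PySem.Set.contains_iff, PySem.Set.mem_ofList,
      PySem.List.mem_pyRange_one]
    constructor
    · rintro ⟨x, ⟨hx1, hx2⟩, hx3⟩; exact ⟨x, hx3, by omega, by omega⟩
    · rintro ⟨x, hx1, hx2, hx3⟩; exact ⟨x, ⟨by omega, by omega⟩, hx1⟩
  have hmono : ∀ (p q : Nat) (hp : p < neg.length) (hq : q < neg.length), p ≤ q → neg[p] ≤ neg[q] := by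
    intro p q hp hq hpq
    rcases Nat.lt_or_ge p q with h | h
    · exact (List.pairwise_iff_getElem.mp hpair) p q hp hq h
    · have : p = q := le_antisymm hpq h
      subst this; exact le_refl _
  rw [Bool.eq_iff_iff, hL]
  by_cases hilen : i < neg.length
  · have : neg[i]? = some neg[i] := List.getElem?_eq_getElem hilen
    simp only [this]
    by_cases hxn : neg[i] ≤ n
    · simp only [hxn, decide_true]
      constructor
      · intro _; trivial
      · intro _
        exact ⟨neg[i], (hmem _).mp (List.getElem_mem hilen), haft hilen, hxn⟩
    · simp only [hxn, decide_false]
      constructor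
      · rintro ⟨x, hx1, hx2, hx3⟩
        exfalso
        obtain ⟨k, hk, hkx⟩ := List.mem_iff_getElem.mp ((hmem x).mpr hx1)
        have hik : i ≤ k := by
          by_contra hc
          have := hbef k hk (by omega)
          omega
        have := hmono i k hilen hk hik
        omega
      · intro h; cases h
  · have : neg[i]? = none := List.getElem?_eq_none (by omega)
    simp only [this]
    constructor
    · rintro ⟨x, hx1, hx2, hx3⟩
      exfalso
      obtain ⟨k, hk, hkx⟩ := List.mem_iff_getElem.mp ((hmem x).mpr hx1)
      have := hbef k hk (by omega)
      omega
    · intro h; cases h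

theorem pv_loop_eq (negative : List Int) (l : List Int) : ∀ (a b : Int) (j : Nat) (out : List String),
    (b :: l).Pairwise (· ≤ ·) →
    (∀ k (hk : k < (PySem.List.sorted negative (fun x => x)).length), k < j →
      (PySem.List.sorted negative (fun x => x))[k] ≤ b) →
    ((l.foldl (pvB_step (PySem.List.sorted negative (fun x => x))) (a, b, j, out)).2.2.2
        ++ [pvB_fmtRange ((l.foldl (pvB_step (PySem.List.sorted negative (fun x => x))) (a, b, j, out)).1,
              (l.foldl (pvB_step (PySem.List.sorted negative (fun x => x))) (a, b, j, out)).2.1)])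
      = out ++ pvB_fmtRange (a, (pvMerge (pvA_gap negative) b l).1)
            :: pvGroups (pvA_gap negative) (pvMerge (pvA_gap negative) b l).2 := by
  induction l with
  | nil =>
    intro a b j out _ _
    simp [pvMerge, pvGroups]
  | cons n rest ih =>
    intro a b j out hpw hbef
    have hbn : b ≤ n := (List.pairwise_cons.mp hpw).1 n (by simp)
    have hrest : (n :: rest).Pairwise (· ≤ ·) := (List.pairwise_cons.mp hpw).2
    obtain ⟨hbef', haft'⟩ := pv_adv_spec (PySem.List.sorted negative (fun x => x)) b j hbef
    have hbefn : ∀ k (hk : k < (PySem.List.sorted negative (fun x => x)).length),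
        k < pvB_adv (PySem.List.sorted negative (fun x => x)) b j →
        (PySem.List.sorted negative (fun x => x))[k] ≤ n :=
      fun k hk hkj => le_trans (hbef' k hk hkj) hbn
    have htest := pv_probe_eq negative b n (pvB_adv (PySem.List.sorted negative (fun x => x)) b j) hbef' haft'
    simp only [List.foldl_cons, pvB_step, pvMerge, ← htest]
    by_cases h : pvA_gap negative b n = true
    · simp only [h, if_true, ih n n _ _ hrest hbefn]
      simp [pvGroups, pvB_fmtRange, List.append_assoc]
    · simp only [Bool.not_eq_true] at h
      simp only [h, Bool.false_eq_true, if_false]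
      exact ih a n _ _ hrest hbefn

theorem lines_branches_do_spec' (lines : List Int) (neg_lines : List Int) (branches : List (Int × Int)) :
    lines_branches_do lines neg_lines branches = lines_branches_do_alt lines neg_lines branches := by
  unfold lines_branches_do lines_branches_do_alt
  -- the relevant-branch sets coincide
  have hrel : (if !branches.isEmpty then
      PySem.Set.ofList (branches.filter (fun b => !(lines.contains b.1) && !(lines.contains b.2)))
    else []) = PySem.Set.ofList (branches.filter (fun b => !(lines.contains b.1) && !(lines.contains b.2))) := by
    cases branches with
    | nil => rfl
    | cons x xs => rfl
  rw [hrel]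
  set R := PySem.Set.ofList (branches.filter (fun b => !(lines.contains b.1) && !(lines.contains b.2))) with hR
  set S := PySem.List.sorted2 R (fun p : Int × Int => p.1) (fun p => p.2) with hS
  have hlen : S.length = R.length := (PySem.List.sorted2_perm R _ _ false).length_eq
  -- branch bodies coincide
  have hBJ : (S.map pvA_fmtBranch) = (S.map pvB_fmtBranch) := by rw [pv_fmtBranch_eq]
  -- line bodies coincide
  have hF : ∀ a0 rest, PySem.List.sorted lines (fun x => x) = a0 :: rest →
      pvA_format_ranges lines neg_lines
        = PySem.Str.join ", "
            ((rest.foldl (pvB_step (PySem.List.sorted neg_lines (fun x => x))) (a0, a0, 0, [])).2.2.2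
              ++ [pvB_fmtRange ((rest.foldl (pvB_step (PySem.List.sorted neg_lines (fun x => x))) (a0, a0, 0, [])).1,
                   (rest.foldl (pvB_step (PySem.List.sorted neg_lines (fun x => x))) (a0, a0, 0, [])).2.1)]) := by
    intro a0 rest hsrt
    have hpw : (a0 :: rest).Pairwise (· ≤ ·) := by
      have := PySem.List.sorted_pairwise lines (fun x => x)
      rw [hsrt] at this
      exact this
    rw [pv_loop_eq neg_lines rest a0 a0 0 [] hpw (by intro k hk hkj; omega)]
    unfold pvA_format_ranges
    rw [hsrt]
    congr 1
    simp [pvGroups, pvB_fmtRange]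
  by_cases hl : lines.isEmpty
  · have hlnil : lines = [] := List.isEmpty_iff.mp hl
    subst hlnil
    have hsrt : PySem.List.sorted ([] : List Int) (fun x => x) = [] := by
      exact (PySem.List.sorted_eq_nil_iff [] _ false).mpr rfl
    rw [hsrt]
    by_cases hRnil : R = []
    · have hSnil : S = [] := List.length_eq_zero_iff.mp (by rw [hlen, hRnil]; rfl)
      simp only [hRnil, hSnil]
      simp [pv_strJoin_nil, String.empty_append]
    · have hSne : S ≠ [] := fun h => hRnil (List.length_eq_zero_iff.mp (by rw [← hlen, h]; rfl))
      have hSie : S.isEmpty = false := by simpa [List.isEmpty_iff] using hSne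
      have hRie : R.isEmpty = false := by
        simpa [List.isEmpty_iff] using hRnil
      simp only [hl, hRie, hSie, Bool.not_false, if_true, Bool.not_true,
        Bool.false_eq_true, if_false, List.nil_append, hlen]
      rw [show PySem.List.sorted2 R (fun p : Int × Int => p.1) (fun p => p.2) = S from rfl, hBJ]
      rw [pv_strJoin_singleton]
      apply String.toList_inj.mp
      simp [String.toList_append]
  · have hlne : lines ≠ [] := fun h => by simp [h] at hl
    obtain ⟨a0, rest, hsrt⟩ : ∃ a0 rest, PySem.List.sorted lines (fun x => x) = a0 :: rest := by
      cases hs : PySem.List.sorted lines (fun x => x) with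
      | nil => exact absurd ((PySem.List.sorted_eq_nil_iff lines _ false).mp hs) hlne
      | cons a r => exact ⟨a, r, rfl⟩
    rw [hsrt]
    have hFr := hF a0 rest hsrt
    by_cases hRnil : R = []
    · have hSnil : S = [] := List.length_eq_zero_iff.mp (by rw [hlen, hRnil]; rfl)
      have hlie : lines.isEmpty = false := by simpa [List.isEmpty_iff] using hlne
      simp only [hRnil, hSnil, hlie, List.isEmpty_nil, Bool.not_false, Bool.not_true, if_true,
        Bool.false_eq_true, if_false, List.append_nil, hFr]
      rw [pv_strJoin_singleton]
      apply String.toList_inj.mp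
      simp [String.toList_append]
    · have hSne : S ≠ [] := fun h => hRnil (List.length_eq_zero_iff.mp (by rw [← hlen, h]; rfl))
      have hSie : S.isEmpty = false := by simpa [List.isEmpty_iff] using hSne
      have hRie : R.isEmpty = false := by simpa [List.isEmpty_iff] using hRnil
      have hlie : lines.isEmpty = false := by simpa [List.isEmpty_iff] using hlne
      simp only [hlie, hRie, hSie, Bool.not_false, if_true, hlen, hFr, List.singleton_append]
      rw [show PySem.List.sorted2 R (fun p : Int × Int => p.1) (fun p => p.2) = S from rfl, hBJ]
      rw [pv_strJoin_pair]
      apply String.toList_inj.mp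
      simp [String.toList_append]

-- ===== VERDICT (by name: the statement is the Claim_ definition above) =====
theorem lines_branches_do_spec : Claim_equal_lines_branches_do := by
  intro lines neg_lines branches _
  exact lines_branches_do_spec' lines neg_lines branches
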